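-- pv_equiv track=rewrite | github.com/nathanlct/probabilistic-parser | utils.py | remove_functional_labels
-- ===== SOURCE A (Python) =====
-- def remove_functional_labels(sentence):
--     """remove functional labels from SEQUOIA sentence, ie transform NP-SUJ into NP"""
--     out = ''
--     remove = 0
--     for c in sentence:
--         if c == ' ':
--             remove = 0
--         elif c == '(':
--             remove = 1
--         elif remove == 1 and c == '-':
--             remove = 2
--         if remove == 2:
--             continue
--         out += c
--     return out
-- ===== SOURCE B (Python) =====
-- import re
--
-- _LABEL = re.compile(r'(\([^ (\-]*)-[^ (]*')
--
-- def remove_functional_labels(sentence):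
--     """remove functional labels from SEQUOIA sentence, ie transform NP-SUJ into NP"""
--     return _LABEL.sub(r'\1', sentence)
-- ===== Notes on version B (the rewrite author's own statement) =====
-- stated objective: idiomatic
-- what changed: Replaces the hand-rolled per-character state machine (a remove flag with three states and string concatenation) by a single compiled regex substitution that strips each dash-led functional suffix inside an opened label.
import Mathlib
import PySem

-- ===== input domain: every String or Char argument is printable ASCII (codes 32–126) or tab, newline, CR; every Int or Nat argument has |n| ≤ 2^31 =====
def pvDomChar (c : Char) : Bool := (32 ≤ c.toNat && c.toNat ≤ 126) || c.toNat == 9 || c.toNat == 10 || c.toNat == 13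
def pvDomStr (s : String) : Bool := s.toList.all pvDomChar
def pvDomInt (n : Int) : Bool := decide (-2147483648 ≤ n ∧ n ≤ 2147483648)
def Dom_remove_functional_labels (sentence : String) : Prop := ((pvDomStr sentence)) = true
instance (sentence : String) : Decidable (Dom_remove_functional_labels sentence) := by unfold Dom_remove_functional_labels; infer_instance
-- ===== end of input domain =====

-- B replaces A's per-character state machine with a single regex substitution (objective: idiomatic).

-- ===== PORT A =====
-- out is kept as a List Char (Python's 'out += c' appends one character).
def rflStep (st : List Char × Nat) (c : Char) : List Char × Nat :=
  let remove := if c = ' ' then 0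
                else if c = '(' then 1
                else if st.2 = 1 ∧ c = '-' then 2
                else st.2
  if remove = 2 then (st.1, remove) else (st.1 ++ [c], remove)

def remove_functional_labels (sentence : String) : String :=
  String.ofList (sentence.toList.foldl rflStep ([], 0)).1

-- ===== PORT B =====
-- Lean has no regex engine, so the single call _LABEL.sub(r'\1', sentence) with
-- pattern r'(\([^ (\-]*)-[^ (]*' is ported by hand, exactly as re.sub scans:
-- left to right, at '(' take the longest run of chars in [^ (\-]; if a '-' follows,
-- the match succeeds and the '-' plus the longest run of [^ (] is dropped (replaced
-- by the kept group); otherwise no match starts here and scanning resumes.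
def rflKeep1 (c : Char) : Bool := !(c = ' ' || c = '(' || c = '-')   -- [^ (\-]
def rflKeep2 (c : Char) : Bool := !(c = ' ' || c = '(')              -- [^ (]

def rflSub : List Char → List Char
  | [] => []
  | c :: rest =>
    if c = '(' then
      let pre := rest.takeWhile rflKeep1
      match _h : rest.drop pre.length with
      | '-' :: tail => c :: (pre ++ rflSub (tail.dropWhile rflKeep2))
      | rest' => c :: (pre ++ rflSub rest')
    else c :: rflSub rest
termination_by l => l.length
decreasing_by
  · have h2 := List.length_drop (l := rest) (i := (rest.takeWhile rflKeep1).length)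
    have h3 : (List.dropWhile rflKeep2 tail).length ≤ tail.length := List.length_dropWhile_le ..
    have h4 : ('-' :: tail).length = rest.length - (rest.takeWhile rflKeep1).length := by
      rw [← _h]; exact h2
    simp at h4 ⊢; omega
  · have h2 := List.length_drop (l := rest) (i := (rest.takeWhile rflKeep1).length)
    rw [_h] at h2; simp; omega
  · simp

def remove_functional_labels_alt (sentence : String) : String :=
  String.ofList (rflSub sentence.toList)

-- ===== PRECONDITION & SPEC =====
def Spec_remove_functional_labels (sentence : String) (out : String) : Prop := out = remove_functional_labels_alt sentence
instance (sentence : String) (out : String) : Decidable (Spec_remove_functional_labels sentence out) := by unfold Spec_remove_functional_labels; infer_instance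

-- ===== CLAIM (what is proved, stated in full; the proofs are below) =====
def Claim_equal_remove_functional_labels : Prop := ∀ (sentence : String), Dom_remove_functional_labels sentence → Spec_remove_functional_labels sentence (remove_functional_labels sentence)

-- ===== LEMMAS AND PROOFS =====

-- what B computes from a position where A is in state remove = 1 (just after a '(' run)
def rflCont1 (l : List Char) : List Char :=
  let pre := l.takeWhile rflKeep1
  match l.drop pre.length with
  | '-' :: tail => pre ++ rflSub (tail.dropWhile rflKeep2)
  | rest' => pre ++ rflSub rest'

theorem rflSub_paren (rest : List Char) : rflSub ('(' :: rest) = '(' :: rflCont1 rest := by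
  rw [rflSub, rflCont1]
  simp only [reduceIte]
  rcases hdrop : List.drop (rest.takeWhile rflKeep1).length rest with _ | ⟨a, tl⟩
  · simp
  · by_cases ha : a = '-'
    · subst ha; simp
    · split <;> simp_all

theorem rflSub_other (c : Char) (rest : List Char) (h : c ≠ '(') :
    rflSub (c :: rest) = c :: rflSub rest := by
  rw [rflSub]; simp [h]

theorem rflCont1_cons (c : Char) (rest : List Char) (h : rflKeep1 c = true) :
    rflCont1 (c :: rest) = c :: rflCont1 rest := by
  rw [rflCont1, rflCont1]
  simp only [List.takeWhile_cons_of_pos h, List.length_cons, List.drop_succ_cons]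
  split <;> simp_all

-- the simultaneous invariant for A's three states
theorem rfl_inv (l : List Char) : ∀ out : List Char,
    (l.foldl rflStep (out, 0)).1 = out ++ rflSub l ∧
    (l.foldl rflStep (out, 1)).1 = out ++ rflCont1 l ∧
    (l.foldl rflStep (out, 2)).1 = out ++ rflSub (l.dropWhile rflKeep2) := by
  induction l with
  | nil => intro out; simp [rflSub, rflCont1]
  | cons c rest ih =>
    intro out
    by_cases hsp : c = ' '
    · subst hsp
      have e0 : rflStep (out, 0) ' ' = (out ++ [' '], 0) := by simp [rflStep]
      have e1 : rflStep (out, 1) ' ' = (out ++ [' '], 0) := by simp [rflStep]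
      have e2 : rflStep (out, 2) ' ' = (out ++ [' '], 0) := by simp [rflStep]
      have hc1 : rflCont1 (' ' :: rest) = rflSub (' ' :: rest) := by
        rw [rflCont1]; simp [List.takeWhile, rflKeep1]
      simp only [List.foldl_cons, e0, e1, e2, (ih (out ++ [' '])).1,
        rflSub_other ' ' rest (by decide), hc1,
        List.dropWhile_cons_of_neg (by simp [rflKeep2] : ¬ rflKeep2 ' ' = true)]
      simp
    · by_cases hp : c = '('
      · subst hp
        have e0 : rflStep (out, 0) '(' = (out ++ ['('], 1) := by simp [rflStep]
        have e1 : rflStep (out, 1) '(' = (out ++ ['('], 1) := by simp [rflStep]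
        have e2 : rflStep (out, 2) '(' = (out ++ ['('], 1) := by simp [rflStep]
        have hc1 : rflCont1 ('(' :: rest) = rflSub ('(' :: rest) := by
          rw [rflCont1]; simp [List.takeWhile, rflKeep1]
        simp only [List.foldl_cons, e0, e1, e2, (ih (out ++ ['('])).2.1, hc1,
          rflSub_paren,
          List.dropWhile_cons_of_neg (by simp [rflKeep2] : ¬ rflKeep2 '(' = true)]
        simp
      · by_cases hd : c = '-'
        · subst hd
          have e0 : rflStep (out, 0) '-' = (out ++ ['-'], 0) := by simp [rflStep]
          have e1 : rflStep (out, 1) '-' = (out, 2) := by simp [rflStep]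
          have e2 : rflStep (out, 2) '-' = (out, 2) := by simp [rflStep]
          have hc1 : rflCont1 ('-' :: rest) = rflSub (rest.dropWhile rflKeep2) := by
            rw [rflCont1]; simp [List.takeWhile, rflKeep1]
          simp only [List.foldl_cons, e0, e1, e2, (ih (out ++ ['-'])).1, (ih out).2.2,
            rflSub_other '-' rest (by decide), hc1,
            List.dropWhile_cons_of_pos (by simp [rflKeep2] : rflKeep2 '-' = true)]
          simp
        · have e0 : rflStep (out, 0) c = (out ++ [c], 0) := by simp [rflStep, hsp, hp]
          have e1 : rflStep (out, 1) c = (out ++ [c], 1) := by simp [rflStep, hsp, hp, hd]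
          have e2 : rflStep (out, 2) c = (out, 2) := by simp [rflStep, hsp, hp, hd]
          have hk1 : rflKeep1 c = true := by simp [rflKeep1, hsp, hp, hd]
          have hk2 : rflKeep2 c = true := by simp [rflKeep2, hsp, hp]
          simp only [List.foldl_cons, e0, e1, e2, (ih (out ++ [c])).1, (ih (out ++ [c])).2.1,
            (ih out).2.2, rflSub_other c rest hp, rflCont1_cons c rest hk1,
            List.dropWhile_cons_of_pos hk2]
          simp

-- ===== VERDICT (by name: the statement is the Claim_ definition above) =====
theorem remove_functional_labels_spec : Claim_equal_remove_functional_labels := by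
  intro sentence _
  unfold Spec_remove_functional_labels remove_functional_labels remove_functional_labels_alt
  rw [(rfl_inv sentence.toList []).1]
  simp
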